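-- pv_equiv track=rewrite | github.com/Joe-Khoa/python_basic_ | Bài 72- Bài tập rèn luyện-tách xử lý chuỗi.mp4/Bài 72- Bài tập rèn luyện-tách xử lý chuỗi.mp4.py | NegaNoStr
-- ===== SOURCE A (Python) =====
-- def NegaNoStr(s):
--     list = []
--     for i in range(len(s)):
--         if s[i] == '-':
--             if s[i+1].isnumeric() is False:
--                 continue
--             else:
--                 list.append('-')
--                 for j in range(i+1,len(s)):
--                     if s[j].isnumeric() == True:
--                         list.append(s[j])
--                     else:
--                         break
--     return list
-- ===== SOURCE B (Python) =====
-- def NegaNoStr(s):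
--     # Single left-to-right pass carrying (pending digit run, negativity flag, previous char)
--     res = []
--     pending = ''
--     neg = False
--     prev = ''
--     for c in s:
--         if c.isnumeric():
--             if not pending:
--                 neg = (prev == '-')
--             pending += c
--         else:
--             if pending and neg:
--                 res.extend('-' + pending)
--             pending = ''
--         prev = c
--     if pending and neg:
--         res.extend('-' + pending)
--     return res
-- ===== Notes on version B (the rewrite author's own statement) =====
-- stated objective: alternative
-- what changed: Replaces A's outer index loop that restarts an inner digit-scan at every '-' (and peeks at s[i+1]) by a single left-to-right pass over the characters carrying a (pending digit run, negativity flag, previous char) state that flushes each run when it ends.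
-- outside the precondition, e.g. on NegaNoStr('-7-'): A raises IndexError, B returns ['-', '7']; on NegaNoStr('-'): A raises IndexError, B returns []
-- crash fix: On strings ending in '-' A evaluates s[i+1] past the end and raises IndexError; B returns the list of negative-number digit runs found in the rest of the string. — e.g. on NegaNoStr("-7-"): A raises IndexError, B returns ["-", "7"]
import Mathlib
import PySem

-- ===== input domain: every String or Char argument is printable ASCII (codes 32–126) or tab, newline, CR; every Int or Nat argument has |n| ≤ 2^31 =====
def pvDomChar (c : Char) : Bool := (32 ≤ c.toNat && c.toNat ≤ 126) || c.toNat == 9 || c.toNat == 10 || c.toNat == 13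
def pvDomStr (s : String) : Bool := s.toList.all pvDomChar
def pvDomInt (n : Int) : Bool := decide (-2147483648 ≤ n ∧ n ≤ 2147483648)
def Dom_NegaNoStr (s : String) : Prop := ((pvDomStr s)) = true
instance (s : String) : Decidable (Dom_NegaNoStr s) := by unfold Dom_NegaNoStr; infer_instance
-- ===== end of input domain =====

-- B replaces A's restart-from-each-'-' nested scan by one left-to-right pass carrying a
-- (pending digit run, negativity flag, previous char) state; same return value, no speed claim.

-- ===== PORT A =====
-- inner loop "for j in range(i+1, len(s)): append while numeric else break", acting on the
-- suffix s[i+1:]; Char.isDigit is exact for .isnumeric() on the printable-ASCII domain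
def pvTakeDigitsA : List Char → List String
  | [] => []
  | c :: rest => if c.isDigit then String.mk [c] :: pvTakeDigitsA rest else []

def NegaNoStr (s : String) : List String :=
  let cs := s.toList
  (List.range cs.length).foldl
    (fun acc i =>
      if cs.getD i ' ' = '-' then
        -- s[i+1] raises IndexError when i+1 = len(s); Pre_ excludes exactly those inputs,
        -- so the default ' ' (not a digit) is never what decides the result inside Pre_
        if (cs.getD (i+1) ' ').isDigit = false then acc
        else (acc ++ ["-"]) ++ pvTakeDigitsA (cs.drop (i+1))
      else acc) []

-- ===== PORT B =====
-- "if pending and neg: res.extend('-' + pending)"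
def pvFlushB (res : List String) (pending : List Char) (neg : Bool) : List String :=
  if pending ≠ [] ∧ neg = true then res ++ "-" :: pending.map (fun c => String.mk [c]) else res

-- loop body of Source B; state = (res, pending, neg, prev); Python's initial prev = '' is `none`
def pvStepB (st : List String × List Char × Bool × Option Char) (c : Char) :
    List String × List Char × Bool × Option Char :=
  let (res, pending, neg, prev) := st
  if c.isDigit then
    (res, pending ++ [c], (if pending = [] then decide (prev = some '-') else neg), some c)
  else
    (pvFlushB res pending neg, [], neg, some c)

def NegaNoStr_alt (s : String) : List String :=
  let st := s.toList.foldl pvStepB ([], [], false, none)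
  pvFlushB st.1 st.2.1 st.2.2.1

-- ===== PRECONDITION & SPEC =====
-- Pre_ excludes exactly the strings ending in '-' : there Python A evaluates s[i+1] at
-- i = len(s)-1 and raises IndexError (it returns normally on every other input).
def Pre_NegaNoStr (s : String) : Prop := s.toList.getLast? ≠ some '-'
instance (s : String) : Decidable (Pre_NegaNoStr s) := by unfold Pre_NegaNoStr; infer_instance

def pvWitness_NegaNoStr : String := "ab-12 x-3"

-- On strings ending in '-' A raises IndexError while B simply returns the runs found so far.
def Raises_NegaNoStr (s : String) : Prop := s.toList.getLast? = some '-'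
instance (s : String) : Decidable (Raises_NegaNoStr s) := by unfold Raises_NegaNoStr; infer_instance
def pvRaiseWitness_NegaNoStr : String := "-7-"
def pvRaiseWitnessOut_NegaNoStr : List String := ["-", "7"]

def Spec_NegaNoStr (s : String) (out : List String) : Prop := out = NegaNoStr_alt s
instance (s : String) (out : List String) : Decidable (Spec_NegaNoStr s out) := by unfold Spec_NegaNoStr; infer_instance

-- ===== CLAIM (what is proved, stated in full; the proofs are below) =====
def Claim_equal_NegaNoStr : Prop := ∀ (s : String), Dom_NegaNoStr s → Pre_NegaNoStr s → Spec_NegaNoStr s (NegaNoStr s)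
def Claim_raises_NegaNoStr : Prop := (∀ (s : String), Dom_NegaNoStr s → Raises_NegaNoStr s → ¬ Pre_NegaNoStr s) ∧ (Dom_NegaNoStr (pvRaiseWitness_NegaNoStr) ∧ Raises_NegaNoStr (pvRaiseWitness_NegaNoStr) ∧ NegaNoStr_alt (pvRaiseWitness_NegaNoStr) = pvRaiseWitnessOut_NegaNoStr)

-- ===== LEMMAS AND PROOFS =====

-- A's fold, over a raw character list
def pvAcore (cs : List Char) : List String :=
  (List.range cs.length).foldl
    (fun acc i =>
      if cs.getD i ' ' = '-' then
        if (cs.getD (i+1) ' ').isDigit = false then acc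
        else (acc ++ ["-"]) ++ pvTakeDigitsA (cs.drop (i+1))
      else acc) []

-- contribution of outer-loop index i
def pvG (cs : List Char) (i : Nat) : List String :=
  if cs.getD i ' ' = '-' then
    if (cs.getD (i+1) ' ').isDigit = false then []
    else "-" :: pvTakeDigitsA (cs.drop (i+1))
  else []

lemma pvFoldl_g (g : Nat → List String) :
    ∀ (l : List Nat) (acc : List String),
      l.foldl (fun a i => a ++ g i) acc = acc ++ l.flatMap g := by
  intro l
  induction l with
  | nil => intro acc; simp
  | cons x xs ih => intro acc; simp [List.foldl_cons, ih]

lemma pvAcore_eq_flatMap (cs : List Char) :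
    pvAcore cs = (List.range cs.length).flatMap (pvG cs) := by
  have hb : (fun (acc : List String) i =>
      if cs.getD i ' ' = '-' then
        if (cs.getD (i+1) ' ').isDigit = false then acc
        else (acc ++ ["-"]) ++ pvTakeDigitsA (cs.drop (i+1))
      else acc) = (fun acc i => acc ++ pvG cs i) := by
    funext acc i
    simp only [pvG]
    split_ifs <;> simp
  unfold pvAcore
  rw [hb, pvFoldl_g]
  simp

lemma pvG_shift (c : Char) (rest : List Char) (i : Nat) :
    pvG (c :: rest) (i+1) = pvG rest i := by
  simp [pvG, List.drop_succ_cons]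

def pvHead0 (cs : List Char) : List String :=
  if cs.getD 0 ' ' = '-' ∧ (cs.getD 1 ' ').isDigit then "-" :: pvTakeDigitsA (cs.drop 1) else []

lemma pvAcore_cons (c : Char) (rest : List Char) :
    pvAcore (c :: rest) = pvHead0 (c :: rest) ++ pvAcore rest := by
  rw [pvAcore_eq_flatMap, pvAcore_eq_flatMap]
  have : (c :: rest).length = rest.length + 1 := rfl
  rw [this, List.range_succ_eq_map, List.flatMap_cons, List.flatMap_map]
  have h2 : (List.range rest.length).flatMap (fun i => pvG (c :: rest) i.succ)
      = (List.range rest.length).flatMap (pvG rest) := by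
    apply List.flatMap_congr
    intro i _
    exact pvG_shift c rest i
  have h1 : pvG (c :: rest) 0 = pvHead0 (c :: rest) := by
    simp only [pvG, pvHead0]
    split_ifs <;> simp_all
  rw [h2, h1]

def pvMapOne (l : List Char) : List String := l.map (fun c => String.mk [c])

lemma pvTakeDigitsA_eq (l : List Char) :
    pvTakeDigitsA l = pvMapOne (l.takeWhile Char.isDigit) := by
  induction l with
  | nil => simp [pvTakeDigitsA, pvMapOne]
  | cons c rest ih =>
    by_cases h : c.isDigit <;> simp [pvTakeDigitsA, h, ih, pvMapOne]

def pvFirstD (cs : List Char) : Bool :=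
  match cs with
  | [] => false
  | c :: _ => c.isDigit

-- the first character of cs is a digit (Python: the run continues)
lemma pvFirstD_getD (cs : List Char) : (cs.getD 0 ' ').isDigit = pvFirstD cs := by
  cases cs <;> simp [pvFirstD]

lemma pvHead0_char (c : Char) (rest : List Char) :
    pvHead0 (c :: rest) =
      if c = '-' ∧ pvFirstD rest = true then "-" :: pvMapOne (rest.takeWhile Char.isDigit) else [] := by
  simp only [pvHead0, List.getD_cons_zero, List.getD_cons_succ, List.drop_succ_cons,
    List.drop_zero, pvFirstD_getD, pvTakeDigitsA_eq]

-- the main invariant of B's single pass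
lemma pvB_invariant :
    ∀ (cs : List Char) (res : List String) (pending : List Char) (neg : Bool) (prev : Option Char),
      pvFlushB (cs.foldl pvStepB (res, pending, neg, prev)).1
        (cs.foldl pvStepB (res, pending, neg, prev)).2.1
        (cs.foldl pvStepB (res, pending, neg, prev)).2.2.1 =
      (if pending = [] then
        res ++ (if prev = some '-' ∧ pvFirstD cs = true then "-" :: pvMapOne (cs.takeWhile Char.isDigit) else []) ++ pvAcore cs
      else
        res ++ (if neg = true then "-" :: (pvMapOne pending ++ pvMapOne (cs.takeWhile Char.isDigit)) else []) ++ pvAcore cs) := by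
  intro cs
  induction cs with
  | nil =>
    intro res pending neg prev
    cases pending <;> cases neg <;>
      simp [pvFlushB, pvFirstD, pvAcore, pvMapOne, List.range_zero]
  | cons c rest ih =>
    intro res pending neg prev
    simp only [List.foldl_cons]
    by_cases hd : c.isDigit
    · have hc : ¬ (c = '-') := by
        intro h; subst h; simp [Char.isDigit] at hd
      have hstep : pvStepB (res, pending, neg, prev) c =
          (res, pending ++ [c], (if pending = [] then decide (prev = some '-') else neg), some c) := by
        simp [pvStepB, hd]
      rw [hstep]
      cases pending with
      | nil =>
        rw [ih]
        simp only [List.nil_append]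
        rw [pvAcore_cons, pvHead0_char]
        simp [pvFirstD, hd, hc, pvMapOne]
      | cons p ps =>
        rw [ih]
        simp only [if_neg (by simp : ¬ ((p :: ps) ++ [c] : List Char) = []),
          if_neg (by simp : ¬ (p :: ps : List Char) = [])]
        rw [pvAcore_cons, pvHead0_char]
        simp [pvFirstD, hd, hc, pvMapOne]
    · have hstep : pvStepB (res, pending, neg, prev) c =
          (pvFlushB res pending neg, [], neg, some c) := by
        simp [pvStepB, hd]
      rw [hstep, ih]
      rw [pvAcore_cons, pvHead0_char]
      cases pending with
      | nil =>
        simp [pvFlushB, pvFirstD, hd]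
      | cons p ps =>
        simp only [if_neg (by simp : ¬ (p :: ps : List Char) = [])]
        simp [pvFlushB, pvFirstD, hd, pvMapOne]
        cases neg <;> simp

lemma pvPorts_eq (s : String) : NegaNoStr s = NegaNoStr_alt s := by
  have hA : NegaNoStr s = pvAcore s.toList := rfl
  have hB := pvB_invariant s.toList [] [] false none
  unfold NegaNoStr_alt
  simp only [] at hB ⊢
  rw [hB, hA]
  simp

-- ===== VERDICT (by name: the statement is the Claim_ definition above) =====
theorem NegaNoStr_spec : Claim_equal_NegaNoStr := by
  intro s _ _
  exact (pvPorts_eq s).symm ▸ rfl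

theorem NegaNoStr_raises : Claim_raises_NegaNoStr := by
  unfold Claim_raises_NegaNoStr
  exact ⟨fun s _ h hp => hp h, by decide⟩

-- self-check: the raise-witness value stated in Claim_raises_ is indeed B's output there
theorem pvRaisesOut_ok : NegaNoStr_alt pvRaiseWitness_NegaNoStr = pvRaiseWitnessOut_NegaNoStr :=
  NegaNoStr_raises.2.2.2
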